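-- pv_equiv track=rewrite | github.com/GingerRanger/scrabble-scorer-python | scrabble_scorer.py | old_scrabble_scorer
-- ===== SOURCE A (Python) =====
-- old_point_structure = {
--   1: ['A', 'E', 'I', 'O', 'U', 'L', 'N', 'R', 'S', 'T'],
--   2: ['D', 'G'],
--   3: ['B', 'C', 'M', 'P'],
--   4: ['F', 'H', 'V', 'W', 'Y'],
--   5: ['K'],
--   8: ['J', 'X'],
--   10: ['Q', 'Z']
-- }
--
-- def old_scrabble_scorer(word):
--     word = word.upper()
--     letterPoints = ""
--
--     for char in word:
--
--         for point_value in old_point_structure: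
--
--             if char in old_point_structure[point_value]:
--                 letterPoints += 'Points for {char}: {point_value}\n'.format(char = char, point_value = point_value)
--
--     return letterPoints
-- ===== SOURCE B (Python) =====
-- # Per-letter values in alphabetical order A..Z; the value of a letter is found by
-- # character-code arithmetic (ord(ch) - 65), not by searching any group or mapping.
-- _POINTS = (1, 3, 3, 2, 1, 4, 2, 4, 1, 8, 5, 1, 3, 1, 1, 3, 10, 1, 1, 1, 1, 4, 4, 8, 4, 10)
--
-- def _line(ch):
--     ch = ch.upper()
--     k = ord(ch) - 65
--     if 0 <= k < 26:
--         return 'Points for {}: {}\n'.format(ch, _POINTS[k])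
--     return ''
--
-- def old_scrabble_scorer(word):
--     return ''.join(map(_line, word))
-- ===== Notes on version B (the rewrite author's own statement) =====
-- stated objective: alternative
-- what changed: Replaces the per-character search through the 7 point groups by direct character-code arithmetic: a flat 26-entry value table indexed by ord(ch)-65 after a range test, decomposed as a per-character helper applied with map and joined, instead of nested loops with string concatenation.
import Mathlib
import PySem

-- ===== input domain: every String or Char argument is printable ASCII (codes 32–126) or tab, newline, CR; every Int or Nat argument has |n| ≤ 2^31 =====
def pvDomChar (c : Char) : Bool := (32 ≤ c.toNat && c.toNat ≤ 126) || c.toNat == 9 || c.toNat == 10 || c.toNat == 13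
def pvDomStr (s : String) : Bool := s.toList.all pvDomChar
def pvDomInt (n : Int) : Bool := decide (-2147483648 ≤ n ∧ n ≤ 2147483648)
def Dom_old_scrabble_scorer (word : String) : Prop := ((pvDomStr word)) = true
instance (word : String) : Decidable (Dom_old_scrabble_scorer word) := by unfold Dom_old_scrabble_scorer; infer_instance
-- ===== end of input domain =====

-- B computes each letter's value by character-code arithmetic into a flat 26-entry table
-- (ord(ch) - 65 after a range test) in a per-character helper applied with map and joined,
-- instead of A's per-character search through the 7 point groups; objective: alternative.

-- ===== PORT A =====
-- the module-level dict {points: [letters]}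
def pvOldPointStructure : PySem.Dict Int (List Char) :=
  PySem.Dict.ofList
    [(1, ['A', 'E', 'I', 'O', 'U', 'L', 'N', 'R', 'S', 'T']),
     (2, ['D', 'G']),
     (3, ['B', 'C', 'M', 'P']),
     (4, ['F', 'H', 'V', 'W', 'Y']),
     (5, ['K']),
     (8, ['J', 'X']),
     (10, ['Q', 'Z'])]

-- 'Points for {char}: {point_value}\n'.format(...)
def pvFmt (c : Char) (v : Int) : String :=
  "Points for " ++ String.ofList [c] ++ ": " ++ PySem.Int.toStr v ++ "\n"

def old_scrabble_scorer (word : String) : String :=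
  let w := PySem.Str.upper word
  w.toList.foldl
    (fun letterPoints c =>
      pvOldPointStructure.keys.foldl
        (fun lp point_value =>
          if c ∈ pvOldPointStructure.getD point_value [] then
            lp ++ pvFmt c point_value
          else lp)
        letterPoints)
    ""

-- ===== PORT B =====
-- _POINTS: per-letter values in alphabetical order A..Z
def pvPoints : List Int := [1, 3, 3, 2, 1, 4, 2, 4, 1, 8, 5, 1, 3, 1, 1, 3, 10, 1, 1, 1, 1, 4, 4, 8, 4, 10]

-- body of _line after 'ch = ch.upper()': k = ord(ch) - 65; range-test then index _POINTS[k]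
-- (the guard 0 ≤ k < 26 makes the index in range, so pyGet? is some there; getD 0 is exact)
def pvLineBody (ch : Char) : String :=
  let k : Int := (ch.toNat : Int) - 65
  if 0 ≤ k ∧ k < 26 then
    "Points for " ++ String.ofList [ch] ++ ": " ++
      PySem.Int.toStr ((PySem.List.pyGet? pvPoints k).getD 0) ++ "\n"
  else ""

-- _line(ch): ch = ch.upper() (exact per ASCII char), then the body above
def pvLine (ch : Char) : String := pvLineBody (PySem.Chars.upperChar ch)

-- ''.join(map(_line, word))
def old_scrabble_scorer_alt (word : String) : String :=
  PySem.Str.join "" (word.toList.map pvLine)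

-- ===== PRECONDITION & SPEC =====
def Spec_old_scrabble_scorer (word : String) (out : String) : Prop := out = old_scrabble_scorer_alt word
instance (word : String) (out : String) : Decidable (Spec_old_scrabble_scorer word out) := by unfold Spec_old_scrabble_scorer; infer_instance

-- ===== CLAIM (what is proved, stated in full; the proofs are below) =====
def Claim_equal_old_scrabble_scorer : Prop := ∀ (word : String), Dom_old_scrabble_scorer word → Spec_old_scrabble_scorer word (old_scrabble_scorer word)

-- ===== LEMMAS AND PROOFS =====

-- the 26 upper-case letters
def pvLetters : List Char :=
  ['A', 'B', 'C', 'D', 'E', 'F', 'G', 'H', 'I', 'J', 'K', 'L', 'M',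
   'N', 'O', 'P', 'Q', 'R', 'S', 'T', 'U', 'V', 'W', 'X', 'Y', 'Z']

-- any char with code in [65, 91) is one of the 26 letters
theorem pv_mem_letters (d : Char) (h1 : 65 ≤ d.toNat) (h2 : d.toNat < 91) :
    d ∈ pvLetters := by
  have hall : ∀ n ∈ List.range 91, 65 ≤ n → Char.ofNat n ∈ pvLetters := by decide
  have hd : Char.ofNat d.toNat = d := Char.ofNat_toNat d
  rw [← hd]
  exact hall _ (List.mem_range.mpr h2) h1

-- A's inner loop over the 7 point groups equals B's arithmetic per-char line
set_option maxRecDepth 4000 in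
theorem pv_inner_eq_line (d : Char) (lp : String) :
    pvOldPointStructure.keys.foldl
      (fun lp point_value =>
        if d ∈ pvOldPointStructure.getD point_value [] then
          lp ++ pvFmt d point_value
        else lp)
      lp = lp ++ pvLineBody d := by
  have hk : pvOldPointStructure.keys = [1, 2, 3, 4, 5, 8, 10] := by decide
  have g1 : pvOldPointStructure.getD 1 [] = ['A', 'E', 'I', 'O', 'U', 'L', 'N', 'R', 'S', 'T'] := by decide
  have g2 : pvOldPointStructure.getD 2 [] = ['D', 'G'] := by decide
  have g3 : pvOldPointStructure.getD 3 [] = ['B', 'C', 'M', 'P'] := by decide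
  have g4 : pvOldPointStructure.getD 4 [] = ['F', 'H', 'V', 'W', 'Y'] := by decide
  have g5 : pvOldPointStructure.getD 5 [] = ['K'] := by decide
  have g6 : pvOldPointStructure.getD 8 [] = ['J', 'X'] := by decide
  have g7 : pvOldPointStructure.getD 10 [] = ['Q', 'Z'] := by decide
  rw [hk]
  simp only [List.foldl_cons, List.foldl_nil, g1, g2, g3, g4, g5, g6, g7]
  by_cases h : 65 ≤ d.toNat ∧ d.toNat < 91
  · -- d is one of the 26 letters: check each case by evaluation
    have hmem := pv_mem_letters d h.1 h.2
    fin_cases hmem <;> (simp; decide)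
  · -- d is no letter: every membership test fails and the range test fails
    have hno : ∀ g : List Char, (∀ e ∈ g, e ∈ pvLetters) → d ∉ g := by
      intro g hg hd
      exact h (by
        have := hg d hd
        fin_cases this <;> decide)
    have m1 := hno ['A', 'E', 'I', 'O', 'U', 'L', 'N', 'R', 'S', 'T'] (by intro e he; fin_cases he <;> decide)
    have m2 := hno ['D', 'G'] (by intro e he; fin_cases he <;> decide)
    have m3 := hno ['B', 'C', 'M', 'P'] (by intro e he; fin_cases he <;> decide)
    have m4 := hno ['F', 'H', 'V', 'W', 'Y'] (by intro e he; fin_cases he <;> decide)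
    have m5 := hno ['K'] (by intro e he; fin_cases he <;> decide)
    have m6 := hno ['J', 'X'] (by intro e he; fin_cases he <;> decide)
    have m7 := hno ['Q', 'Z'] (by intro e he; fin_cases he <;> decide)
    rw [if_neg m1, if_neg m2, if_neg m3, if_neg m4, if_neg m5, if_neg m6, if_neg m7]
    have harith : ¬ (0 ≤ ((d.toNat : Int) - 65) ∧ ((d.toNat : Int) - 65) < 26) := by omega
    unfold pvLineBody
    rw [if_neg harith]
    apply String.ext
    simp

-- join with empty separator distributes over cons
theorem pv_join_empty_cons (p : String) (ps : List String) :
    PySem.Str.join "" (p :: ps) = p ++ PySem.Str.join "" ps := by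
  apply String.ext
  cases ps with
  | nil =>
    simp [PySem.Str.toList_join, PySem.Chars.join_singleton, PySem.Chars.join_nil]
  | cons q ps =>
    simp [PySem.Str.toList_join, PySem.Chars.join_cons_cons]

-- joining the mapped lines equals folding the per-char appends
theorem pv_join_map_eq_foldl (f : Char → String) :
    ∀ (cs : List Char) (a : String),
      a ++ PySem.Str.join "" (cs.map f) = cs.foldl (fun acc c => acc ++ f c) a := by
  intro cs
  induction cs with
  | nil =>
    intro a
    apply String.ext
    simp [PySem.Str.toList_join, PySem.Chars.join_nil]
  | cons c cs ih =>
    intro a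
    simp only [List.map_cons, List.foldl_cons, pv_join_empty_cons]
    rw [← ih (a ++ f c)]
    apply String.ext
    simp

-- ===== VERDICT (by name: the statement is the Claim_ definition above) =====
theorem old_scrabble_scorer_spec : Claim_equal_old_scrabble_scorer := by
  intro word _
  unfold Spec_old_scrabble_scorer old_scrabble_scorer old_scrabble_scorer_alt
  simp only []
  rw [PySem.List.foldl_congr_mem _ _ (fun acc d => acc ++ pvLineBody d) _
        (by intro acc d _; exact pv_inner_eq_line d acc)]
  have hB : PySem.Str.join "" (word.toList.map pvLine)
      = word.toList.foldl (fun acc c => acc ++ pvLine c) "" := by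
    rw [← pv_join_map_eq_foldl pvLine word.toList ""]
    apply String.ext
    simp
  rw [hB]
  have hup : (PySem.Str.upper word).toList = word.toList.map PySem.Chars.upperChar := by
    simp [PySem.Chars.upper]
  rw [hup, List.foldl_map]
  simp only [pvLine]
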